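-- pv_equiv track=rewrite | github.com/nikeair6688/aiclass | fengshui_app.py | get_hour_branch
-- ===== SOURCE A (Python) =====
-- HOUR_BRANCHES = [
--     (23, 1, "子"), (1, 3, "丑"), (3, 5, "寅"), (5, 7, "卯"),
--     (7, 9, "辰"), (9, 11, "巳"), (11, 13, "午"), (13, 15, "未"),
--     (15, 17, "申"), (17, 19, "酉"), (19, 21, "戌"), (21, 23, "亥"),
-- ]
--
-- def get_hour_branch(hour: int) -> str:
--     for start, end, branch in HOUR_BRANCHES:
--         if start > end:
--             if hour >= start or hour < end:
--                 return branch
--         else: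
--             if start <= hour < end:
--                 return branch
--     return "子"
-- ===== SOURCE B (Python) =====
-- _BRANCHES = ["子", "丑", "寅", "卯", "辰", "巳", "午", "未", "申", "酉", "戌", "亥"]
--
-- def get_hour_branch(hour: int) -> str:
--     if 0 <= hour <= 23:
--         return _BRANCHES[(hour + 1) // 2 % 12]
--     return "子"
-- ===== Notes on version B (the rewrite author's own statement) =====
-- stated objective: simpler
-- what changed: Replaces the scan over the list of (start, end, branch) ranges with a closed-form modular index into the ordered branch list, keeping the same default branch for out-of-range hours.
import Mathlib
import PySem

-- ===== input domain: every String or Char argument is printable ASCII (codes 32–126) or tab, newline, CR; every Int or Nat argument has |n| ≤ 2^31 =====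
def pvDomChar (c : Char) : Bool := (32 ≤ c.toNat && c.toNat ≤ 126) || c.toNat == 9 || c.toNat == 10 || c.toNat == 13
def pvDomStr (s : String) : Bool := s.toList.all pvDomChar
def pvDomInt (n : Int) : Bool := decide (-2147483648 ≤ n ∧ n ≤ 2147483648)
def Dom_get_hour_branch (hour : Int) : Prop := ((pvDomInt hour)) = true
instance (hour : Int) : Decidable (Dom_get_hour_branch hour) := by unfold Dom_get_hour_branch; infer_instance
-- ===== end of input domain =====

-- B replaces A's scan over (start, end, branch) ranges with a closed-form modular
-- index into the ordered branch list; same default branch out of range (objective: simpler).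


-- ===== PORT A =====
def HOUR_BRANCHES : List (Int × Int × String) := [
  (23, 1, "子"), (1, 3, "丑"), (3, 5, "寅"), (5, 7, "卯"),
  (7, 9, "辰"), (9, 11, "巳"), (11, 13, "午"), (13, 15, "未"),
  (15, 17, "申"), (17, 19, "酉"), (19, 21, "戌"), (21, 23, "亥")]

-- the for-loop with early return, as structural recursion over the table
def hourLoopA (hour : Int) : List (Int × Int × String) → String
  | [] => "子"
  | (start, stop, branch) :: rest =>
    if start > stop then
      if hour ≥ start ∨ hour < stop then branch else hourLoopA hour rest
    else
      if start ≤ hour ∧ hour < stop then branch else hourLoopA hour rest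

def get_hour_branch (hour : Int) : String := hourLoopA hour HOUR_BRANCHES

-- ===== PORT B =====
-- closed-form index into _BRANCHES; the index is always in range so pyGet? is always some (getD never fires)
def BRANCHES : List String := ["子", "丑", "寅", "卯", "辰", "巳", "午", "未", "申", "酉", "戌", "亥"]

def get_hour_branch_alt (hour : Int) : String :=
  if 0 ≤ hour ∧ hour ≤ 23 then
    (PySem.List.pyGet? BRANCHES
      (PySem.Int.mod (PySem.Int.floordiv (hour + 1) 2) 12)).getD ""
  else "子"

-- ===== PRECONDITION & SPEC =====
def Spec_get_hour_branch (hour : Int) (out : String) : Prop := out = get_hour_branch_alt hour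
instance (hour : Int) (out : String) : Decidable (Spec_get_hour_branch hour out) := by unfold Spec_get_hour_branch; infer_instance

-- ===== CLAIM (what is proved, stated in full; the proofs are below) =====
def Claim_equal_get_hour_branch : Prop := ∀ (hour : Int), Dom_get_hour_branch hour → Spec_get_hour_branch hour (get_hour_branch hour)

-- ===== LEMMAS AND PROOFS =====

-- ===== VERDICT (by name: the statement is the Claim_ definition above) =====
theorem get_hour_branch_spec : Claim_equal_get_hour_branch := by
  intro hour _
  show get_hour_branch hour = get_hour_branch_alt hour
  by_cases h : 0 ≤ hour ∧ hour ≤ 23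
  · obtain ⟨h0, h1⟩ := h
    interval_cases hour <;> decide
  · have hb : get_hour_branch_alt hour = "子" := by
      simp [get_hour_branch_alt, h]
    rw [hb, get_hour_branch, HOUR_BRANCHES]
    norm_num [hourLoopA]
    omega
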